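-- pv_equiv track=rewrite | github.com/pepperbob/adventofcode | 2020/no18/solve.py | pimp
-- ===== SOURCE A (Python) =====
-- def pimp(op):
--     pimped = ""
--     flag = False
--     for s in op:
--         if(s in list("1234567890")):
--             if(not flag):
--                 pimped += "Num("
--                 flag=True
--         else:
--             if flag:
--                 pimped += ")"
--                 flag = False
--         pimped += s
--
--     if flag:
--         pimped += ")"
--     return pimped.replace("*", "-")
-- ===== SOURCE B (Python) =====
-- import re
--
-- def pimp(op):
--     return re.sub(r'[0-9]+', r'Num(\g<0>)', op).replace('*', '-')
-- ===== Notes on version B (the rewrite author's own statement) =====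
-- stated objective: faster
-- what changed: Replaces A's per-character flag/state-machine loop with string concatenation by a single regex substitution that wraps each maximal digit run, keeping the same final asterisk-to-minus replace; the C-level regex engine and avoidance of quadratic string appends make it measurably faster.
import Mathlib
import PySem

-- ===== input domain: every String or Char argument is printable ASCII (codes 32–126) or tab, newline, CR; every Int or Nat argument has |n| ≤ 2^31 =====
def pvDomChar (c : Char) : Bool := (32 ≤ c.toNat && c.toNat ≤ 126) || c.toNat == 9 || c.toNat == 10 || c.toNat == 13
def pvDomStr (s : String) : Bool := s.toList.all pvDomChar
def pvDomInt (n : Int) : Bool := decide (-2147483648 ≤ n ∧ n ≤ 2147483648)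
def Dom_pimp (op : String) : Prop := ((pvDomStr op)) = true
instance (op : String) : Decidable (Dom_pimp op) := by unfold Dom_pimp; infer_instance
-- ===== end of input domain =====

-- B replaces A's per-character flag loop by a single regex-style substitution wrapping
-- each maximal digit run in Num(...); same final '*'->'-' replace. Objective: idiomatic.

-- ===== PORT A =====
-- per-character loop with accumulator (pimped, flag), as in A
def pimpStep (st : List Char × Bool) (s : Char) : List Char × Bool :=
  let (pimped, flag) := st
  if s ∈ "1234567890".toList then
    let pimped := if ¬flag then pimped ++ "Num(".toList else pimped
    (pimped ++ [s], true)
  else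
    let pimped := if flag then pimped ++ [')'] else pimped
    (pimped ++ [s], false)

def pimp (op : String) : String :=
  let st := op.toList.foldl pimpStep ([], false)
  let pimped := if st.2 then st.1 ++ [')'] else st.1
  PySem.Str.replace (String.mk pimped) "*" "-"

-- ===== PORT B =====
-- port of re.sub(r'[0-9]+', r'Num(\g<0>)', op): wrap each maximal digit run
def pvIsDig (c : Char) : Bool := c ∈ "0123456789".toList

def wrapRuns : List Char → List Char
  | [] => []
  | c :: rest =>
    if pvIsDig c then
      "Num(".toList ++ (c :: rest).takeWhile pvIsDig ++ [')']
        ++ wrapRuns ((c :: rest).dropWhile pvIsDig)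
    else c :: wrapRuns rest
termination_by l => l.length
decreasing_by
  · simp only [List.dropWhile]
    split
    · exact Nat.lt_succ_of_le (List.length_dropWhile_le _ _)
    · simp_all
  · simp

def pimp_alt (op : String) : String :=
  PySem.Str.replace (String.mk (wrapRuns op.toList)) "*" "-"

-- ===== PRECONDITION & SPEC =====
def Spec_pimp (op : String) (out : String) : Prop := out = pimp_alt op
instance (op : String) (out : String) : Decidable (Spec_pimp op out) := by unfold Spec_pimp; infer_instance

-- ===== CLAIM (what is proved, stated in full; the proofs are below) =====
def Claim_equal_pimp : Prop := ∀ (op : String), Dom_pimp op → Spec_pimp op (pimp op)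

-- ===== LEMMAS AND PROOFS =====

def pvFinalize (st : List Char × Bool) : List Char :=
  if st.2 then st.1 ++ [')'] else st.1

theorem pv_dig_iff (c : Char) : (c ∈ "1234567890".toList) ↔ pvIsDig c = true := by
  simp only [pvIsDig]
  simp
  tauto

theorem pv_fold_wrap (l : List Char) : ∀ acc,
    pvFinalize (l.foldl pimpStep (acc, false)) = acc ++ wrapRuns l ∧
    pvFinalize (l.foldl pimpStep (acc, true))
      = acc ++ l.takeWhile pvIsDig ++ [')'] ++ wrapRuns (l.dropWhile pvIsDig) := by
  induction l with
  | nil => intro acc; simp [pvFinalize, wrapRuns]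
  | cons c rest ih =>
    intro acc
    by_cases h : pvIsDig c = true
    · have hc : c ∈ "1234567890".toList := (pv_dig_iff c).mpr h
      have htw : (c :: rest).takeWhile pvIsDig = c :: rest.takeWhile pvIsDig :=
        List.takeWhile_cons_of_pos h
      have hdw : (c :: rest).dropWhile pvIsDig = rest.dropWhile pvIsDig :=
        List.dropWhile_cons_of_pos h
      constructor
      · simp only [List.foldl_cons, pimpStep, hc, if_pos]
        rw [wrapRuns]
        simp only [h, if_pos, htw, hdw]
        have h2 := (ih (acc ++ "Num(".toList ++ [c])).2
        simp only [Bool.not_false, if_true] at *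
        simp at h2 ⊢
        simpa using h2
      · simp only [List.foldl_cons, pimpStep, hc, if_pos]
        have h2 := (ih (acc ++ [c])).2
        simp only [htw, hdw, Bool.not_true, if_false] at *
        simp at h2 ⊢
        simpa using h2
    · have hc : c ∉ "1234567890".toList := fun hm => h ((pv_dig_iff c).mp hm)
      have hb : pvIsDig c = false := by simpa using h
      have htw : (c :: rest).takeWhile pvIsDig = [] := by
        simp [List.takeWhile, hb]
      have hdw : (c :: rest).dropWhile pvIsDig = c :: rest := by
        simp [List.dropWhile, hb]
      constructor
      · simp only [List.foldl_cons, pimpStep, hc, if_neg]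
        rw [wrapRuns.eq_def]
        simp only [hb, Bool.false_eq_true, if_false]
        have h1 := (ih (acc ++ [c])).1
        simp at h1 ⊢
        simpa using h1
      · simp only [List.foldl_cons, pimpStep, hc, if_neg]
        rw [wrapRuns.eq_def]
        simp only [hb, Bool.false_eq_true, if_false, htw, hdw]
        have h1 := (ih (acc ++ [')'] ++ [c])).1
        simp at h1 ⊢
        simpa using h1

-- ===== VERDICT (by name: the statement is the Claim_ definition above) =====
theorem pimp_spec : Claim_equal_pimp := by
  intro op _
  unfold Spec_pimp pimp pimp_alt
  have := (pv_fold_wrap op.toList []).1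
  simp only [pvFinalize] at this
  simp [this]
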